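-- pv_equiv track=rewrite | github.com/FedorF/leetcode | Problems/Daily Challenge/Medium/1043. Partition Array for Maximum Sum/solution_memo.py | calc_max_sum_partitioned
-- ===== SOURCE A (Python) =====
-- from typing import List
--
-- def calc_max_sum_partitioned(xs: List[int], k: int) -> int:
--     """
--     Memoization approach.
--
--
--     Time complexity: O(len(xs)*k)
--     Space complexity: O(len(xs))
--
--     """
--     if k == 1:
--         return sum(xs)
--
--     if k >= len(xs):
--         return len(xs) * max(xs)
--
--     cache = {}
--
--     def dfs(left_bound: int = 0):
--         if left_bound >= len(xs):
--             return 0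
--
--         if left_bound in cache:
--             return cache[left_bound]
--
--         max_sum = window_max_el = 0
--         for right_bound in range(left_bound, left_bound + k):
--             if right_bound == len(xs):  # reached end of xs
--                 break
--
--             window_max_el = max(window_max_el, xs[right_bound])  # find current max element in window
--             window_size = right_bound + 1 - left_bound  # find current window size
--             max_sum = max(max_sum, window_max_el * window_size + dfs(right_bound + 1))
--
--         cache[left_bound] = max_sum
--         return max_sum
--
--     return dfs()
-- ===== SOURCE B (Python) =====
-- from typing import List
--
-- def calc_max_sum_partitioned(xs: List[int], k: int) -> int:
--     """Bottom-up DP over suffix lengths instead of memoized recursion."""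
--     if k == 1:
--         return sum(xs)
--
--     if k >= len(xs):
--         return len(xs) * max(xs)
--
--     n = len(xs)
--     dp = [0]  # dp[m] = best value for the suffix of length m
--     for m in range(1, n + 1):
--         i = n - m
--         wmax = best = 0
--         for j in range(1, min(k, m) + 1):
--             wmax = max(wmax, xs[i + j - 1])
--             best = max(best, wmax * j + dp[m - j])
--         dp.append(best)
--     return dp[n]
-- ===== Notes on version B (the rewrite author's own statement) =====
-- stated objective: faster
-- what changed: Replaced the top-down memoized recursion (nested dfs with a dict cache) by an iterative bottom-up DP that fills a table dp[m] over suffix lengths with an incrementally tracked window maximum; both guards are kept verbatim.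
import Mathlib
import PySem

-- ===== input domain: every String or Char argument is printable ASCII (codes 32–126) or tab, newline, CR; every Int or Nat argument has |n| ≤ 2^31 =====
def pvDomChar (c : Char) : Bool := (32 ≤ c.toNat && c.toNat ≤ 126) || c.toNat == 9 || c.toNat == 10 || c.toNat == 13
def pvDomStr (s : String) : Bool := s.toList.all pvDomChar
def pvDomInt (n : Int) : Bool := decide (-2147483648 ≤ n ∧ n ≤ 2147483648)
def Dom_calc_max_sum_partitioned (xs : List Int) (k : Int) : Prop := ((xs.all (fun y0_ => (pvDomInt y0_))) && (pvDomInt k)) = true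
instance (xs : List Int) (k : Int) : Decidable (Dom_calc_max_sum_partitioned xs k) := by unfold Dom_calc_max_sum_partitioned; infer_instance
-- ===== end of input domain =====

-- B replaces A's memoized recursion by an iterative bottom-up DP table over suffix lengths (same O(n*k) work, no recursion/dict overhead; a timing run measured it faster).

-- ===== PORT A =====
-- A's dfs mutates a dict cache; the port threads the cache through the recursion.
-- fuel bounds the recursion depth (left_bound grows by ≥ 1 per nested call, so xs.length + 1 suffices).
mutual
def pvDfsA (xs : List Int) (k : Int) : Nat → Int → PySem.Dict Int Int → Int × PySem.Dict Int Int
  | 0, _, c => (0, c)                           -- unreachable with the fuel supplied below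
  | fuel + 1, lb, c =>
    if (xs.length : Int) ≤ lb then (0, c)
    else
      match c.get? lb with
      | some v => (v, c)
      | none =>
        let r := pvLoopA xs k fuel (PySem.List.pyRange lb (lb + k) 1) lb 0 0 c
        (r.1, (r.2.2).insert lb r.1)
  termination_by fuel _ _ => (fuel, 0)

-- the 'for right_bound in range(left_bound, left_bound + k)' loop with its break; state = (max_sum, window_max_el, cache)
def pvLoopA (xs : List Int) (k : Int) (fuel : Nat) : List Int → Int → Int → Int → PySem.Dict Int Int → Int × Int × PySem.Dict Int Int
  | [], _, ms, wm, c => (ms, wm, c)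
  | rb :: rest, lb, ms, wm, c =>
    if rb = (xs.length : Int) then (ms, wm, c)  -- break: reached end of xs
    else
      let wm' := max wm ((PySem.List.pyGet? xs rb).getD 0)   -- rb is in range here, so getD 0 is exact
      let s := pvDfsA xs k fuel (rb + 1) c
      pvLoopA xs k fuel rest lb (max ms (wm' * (rb + 1 - lb) + s.1)) wm' s.2
  termination_by l _ _ _ _ => (fuel, l.length + 1)
end

def calc_max_sum_partitioned (xs : List Int) (k : Int) : Int :=
  if k = 1 then xs.sum
  else if (xs.length : Int) ≤ k then
    (xs.length : Int) * ((PySem.List.max? xs (fun y => y)).getD 0)        -- max([]) raises: excluded by Pre_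
  else (pvDfsA xs k (xs.length + 1) 0 PySem.Dict.empty).1

-- ===== PORT B =====
-- inner loop of Source B: for j in range(1, min(k, m) + 1), state (wmax, best);
-- dp is kept in reversed order (newest suffix value first), so Python's dp[m - j] is entry (j - 1) here.
def pvRowB (xs : List Int) (k : Int) (n : Int) (m : Int) (dp : List Int) : Int :=
  ((PySem.List.pyRange 1 (min k m + 1) 1).foldl (fun (st : Int × Int) j =>
      let wm := max st.1 ((PySem.List.pyGet? xs (n - m + j - 1)).getD 0)
      (wm, max st.2 (wm * j + (PySem.List.pyGet? dp (j - 1)).getD 0))) (0, 0)).2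

def calc_max_sum_partitioned_alt (xs : List Int) (k : Int) : Int :=
  if k = 1 then xs.sum
  else if (xs.length : Int) ≤ k then
    (xs.length : Int) * ((PySem.List.max? xs (fun y => y)).getD 0)        -- max([]) raises: excluded by Pre_
  else
    let n : Int := xs.length
    let dp := (PySem.List.pyRange 1 (n + 1) 1).foldl (fun dp m => pvRowB xs k n m dp :: dp) [0]
    (PySem.List.pyGet? dp 0).getD 0                          -- Python's dp[n] is the head of the reversed list

-- ===== PRECONDITION & SPEC =====
-- Pre_ excludes exactly the inputs where A raises: empty xs with k ≠ 1 and k ≥ 0 reaches max([]) (ValueError); B raises there too.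
def Pre_calc_max_sum_partitioned (xs : List Int) (k : Int) : Prop := xs = [] → (k = 1 ∨ k < 0)
instance (xs : List Int) (k : Int) : Decidable (Pre_calc_max_sum_partitioned xs k) := by unfold Pre_calc_max_sum_partitioned; infer_instance
def pvWitness_calc_max_sum_partitioned : List Int × Int := ([1, 15, 7, 9, 2, 5, 10], 3)

def Spec_calc_max_sum_partitioned (xs : List Int) (k : Int) (out : Int) : Prop := out = calc_max_sum_partitioned_alt xs k
instance (xs : List Int) (k : Int) (out : Int) : Decidable (Spec_calc_max_sum_partitioned xs k out) := by unfold Spec_calc_max_sum_partitioned; infer_instance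

-- ===== CLAIM (what is proved, stated in full; the proofs are below) =====
def Claim_equal_calc_max_sum_partitioned : Prop := ∀ (xs : List Int) (k : Int), Dom_calc_max_sum_partitioned xs k → Pre_calc_max_sum_partitioned xs k → Spec_calc_max_sum_partitioned xs k (calc_max_sum_partitioned xs k)

-- ===== LEMMAS AND PROOFS =====

-- the DP table of B, row by row: pvTbl m = [S m, S (m-1), …, S 0] where S m is the optimum for the suffix of length m
def pvTbl (xs : List Int) (k : Int) : Nat → List Int
  | 0 => [0]
  | m + 1 => pvRowB xs k (xs.length : Int) ((m : Int) + 1) (pvTbl xs k m) :: pvTbl xs k m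

def pvS (xs : List Int) (k : Int) (m : Nat) : Int := (pvTbl xs k m).headD 0

-- common pure reference for both inner loops: t iterations remaining, current block length j
def pvInner (xs : List Int) (k : Int) (lb : Int) : Nat → Int → Int → Int → Int
  | 0, _, _, ms => ms
  | t + 1, j, wm, ms =>
      let wm' := max wm ((PySem.List.pyGet? xs (lb + j - 1)).getD 0)
      pvInner xs k lb t (j + 1) wm' (max ms (wm' * j + pvS xs k (((xs.length : Int) - lb - j).toNat)))

def pvInv (xs : List Int) (k : Int) (c : PySem.Dict Int Int) : Prop :=
  ∀ key v, c.get? key = some v → 0 ≤ key ∧ key ≤ (xs.length : Int) ∧ v = pvS xs k (((xs.length : Int) - key).toNat)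

lemma pvTbl_get (xs : List Int) (k : Int) :
    ∀ (m j : Nat), j ≤ m → PySem.List.pyGet? (pvTbl xs k m) ((j : Nat) : Int) = some (pvS xs k (m - j)) := by
  intro m
  induction m with
  | zero =>
    intro j hj
    have : j = 0 := by omega
    subst this
    simp [pvTbl, pvS]
  | succ m ih =>
    intro j hj
    cases j with
    | zero => simp [pvTbl, pvS]
    | succ j =>
      have hj' : j ≤ m := by omega
      have := ih j hj'
      rw [PySem.List.pyGet?_natCast] at this ⊢
      simpa [pvTbl] using this

lemma pvRowB_fold (xs : List Int) (k : Int) (m : Nat) (h1 : 1 ≤ m) :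
    ∀ (t : Nat) (j wm ms : Int), 1 ≤ j → (min k (m : Int) + 1 - j).toNat = t →
      ((PySem.List.pyRange j (min k (m : Int) + 1) 1).foldl (fun (st : Int × Int) j' =>
          let wm' := max st.1 ((PySem.List.pyGet? xs ((xs.length : Int) - (m : Int) + j' - 1)).getD 0)
          (wm', max st.2 (wm' * j' + (PySem.List.pyGet? (pvTbl xs k (m - 1)) (j' - 1)).getD 0))) (wm, ms)).2
      = pvInner xs k ((xs.length : Int) - (m : Int)) ((min k (m : Int) - j + 1).toNat) j wm ms := by
  intro t
  induction t with
  | zero =>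
    intro j wm ms hj ht
    have hle : min k (m : Int) + 1 ≤ j := by omega
    have hc : (min k (m : Int) - j + 1).toNat = 0 := by omega
    rw [PySem.List.pyRange_one_eq_nil hle, hc]
    simp [pvInner]
  | succ t ih =>
    intro j wm ms hj ht
    have hlt : j < min k (m : Int) + 1 := by omega
    rw [PySem.List.pyRange_one_cons hlt, List.foldl_cons]
    have hc : (min k (m : Int) - j + 1).toNat = t + 1 := by omega
    rw [hc]
    have hidx : PySem.List.pyGet? (pvTbl xs k (m - 1)) (j - 1) = some (pvS xs k ((m - 1) - (j - 1).toNat)) := by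
      have hcast : ((j - 1).toNat : Int) = j - 1 := by omega
      rw [← hcast]
      exact pvTbl_get xs k (m - 1) (j - 1).toNat (by omega)
    have hS : (m - 1) - (j - 1).toNat = ((m : Int) - j).toNat := by omega
    rw [hS] at hidx
    have := ih (j + 1) (max wm ((PySem.List.pyGet? xs ((xs.length : Int) - (m : Int) + j - 1)).getD 0))
      (max ms (max wm ((PySem.List.pyGet? xs ((xs.length : Int) - (m : Int) + j - 1)).getD 0) * j +
        pvS xs k (((m : Int) - j).toNat))) (by omega) (by omega)
    have hc2 : (min k (m : Int) - (j + 1) + 1).toNat = t := by omega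
    rw [hc2] at this
    show _ = pvInner xs k ((xs.length : Int) - (m : Int)) (t + 1) j wm ms
    rw [pvInner]
    have hS2 : ((xs.length : Int) - ((xs.length : Int) - (m : Int)) - j).toNat = ((m : Int) - j).toNat := by omega
    simp only [hidx, Option.getD_some, hS2] at this ⊢
    convert this using 3

lemma pvRowB_eq_inner (xs : List Int) (k : Int) (m : Nat) (h1 : 1 ≤ m) :
    pvRowB xs k (xs.length : Int) (m : Int) (pvTbl xs k (m - 1))
      = pvInner xs k ((xs.length : Int) - (m : Int)) ((min k (m : Int)).toNat) 1 0 0 := by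
  have := pvRowB_fold xs k m h1 ((min k (m : Int) + 1 - 1).toNat) 1 0 0 (le_refl 1) rfl
  have hc : (min k (m : Int) - 1 + 1).toNat = (min k (m : Int)).toNat := by omega
  rw [hc] at this
  exact this

lemma pvLoop_ok (xs : List Int) (k : Int) (fuel : Nat)
    (H : ∀ lb c, 0 ≤ lb → lb ≤ (xs.length : Int) → (xs.length : Int) - lb < (fuel : Int) → pvInv xs k c →
      (pvDfsA xs k fuel lb c).1 = pvS xs k (((xs.length : Int) - lb).toNat) ∧
      pvInv xs k (pvDfsA xs k fuel lb c).2) :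
    ∀ (t : Nat) (lb rb ms wm : Int) (c : PySem.Dict Int Int), 0 ≤ lb → lb ≤ rb → rb ≤ (xs.length : Int) →
      (lb + k - rb).toNat = t → (xs.length : Int) - lb ≤ (fuel : Int) → pvInv xs k c →
      (pvLoopA xs k fuel (PySem.List.pyRange rb (lb + k) 1) lb ms wm c).1
        = pvInner xs k lb ((min (lb + k) (xs.length : Int) - rb).toNat) (rb - lb + 1) wm ms
      ∧ pvInv xs k (pvLoopA xs k fuel (PySem.List.pyRange rb (lb + k) 1) lb ms wm c).2.2 := by
  intro t
  induction t with
  | zero =>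
    intro lb rb ms wm c h0 hlr hrn ht hf hc
    have hle : lb + k ≤ rb := by omega
    have hcnt : (min (lb + k) (xs.length : Int) - rb).toNat = 0 := by omega
    rw [PySem.List.pyRange_one_eq_nil hle, hcnt, pvLoopA, pvInner]
    exact ⟨rfl, hc⟩
  | succ t ih =>
    intro lb rb ms wm c h0 hlr hrn ht hf hc
    have hlt : rb < lb + k := by omega
    rw [PySem.List.pyRange_one_cons hlt]
    rw [pvLoopA]
    by_cases hend : rb = (xs.length : Int)
    · have hcnt : (min (lb + k) (xs.length : Int) - rb).toNat = 0 := by omega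
      rw [if_pos hend, hcnt, pvInner]
      exact ⟨rfl, hc⟩
    · rw [if_neg hend]
      have hrn' : rb < (xs.length : Int) := lt_of_le_of_ne hrn hend
      obtain ⟨hs1, hs2⟩ := H (rb + 1) c (by omega) (by omega) (by omega) hc
      have hrest := ih lb (rb + 1)
        (max ms (max wm ((PySem.List.pyGet? xs rb).getD 0) * (rb + 1 - lb) + (pvDfsA xs k fuel (rb + 1) c).1))
        (max wm ((PySem.List.pyGet? xs rb).getD 0)) (pvDfsA xs k fuel (rb + 1) c).2
        h0 (by omega) (by omega) (by omega) hf hs2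
      have hcnt : (min (lb + k) (xs.length : Int) - rb).toNat
          = (min (lb + k) (xs.length : Int) - (rb + 1)).toNat + 1 := by omega
      rw [hcnt]
      refine ⟨?_, hrest.2⟩
      rw [hrest.1, pvInner]
      have e1 : rb - lb + 1 + 1 = rb + 1 - lb + 1 := by ring
      have e2 : lb + (rb - lb + 1) - 1 = rb := by ring
      have e3 : ((xs.length : Int) - lb - (rb - lb + 1)).toNat = ((xs.length : Int) - (rb + 1)).toNat := by omega
      rw [e1, e2, e3, hs1]
      ring_nf

lemma pvDfs_ok (xs : List Int) (k : Int) :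
    ∀ (fuel : Nat) (lb : Int) (c : PySem.Dict Int Int), 0 ≤ lb → lb ≤ (xs.length : Int) →
      (xs.length : Int) - lb < (fuel : Int) → pvInv xs k c →
      (pvDfsA xs k fuel lb c).1 = pvS xs k (((xs.length : Int) - lb).toNat) ∧
      pvInv xs k (pvDfsA xs k fuel lb c).2 := by
  intro fuel
  induction fuel with
  | zero => intro lb c h0 hn hf hc; exact absurd hf (by push_cast; omega)
  | succ fuel ih =>
    intro lb c h0 hn hf hc
    rw [pvDfsA]
    by_cases hend : (xs.length : Int) ≤ lb
    · have : ((xs.length : Int) - lb).toNat = 0 := by omega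
      rw [if_pos hend, this]
      exact ⟨by simp [pvS, pvTbl], hc⟩
    · rw [if_neg hend]
      have hlt : lb < (xs.length : Int) := by omega
      cases hget : c.get? lb with
      | some v =>
        obtain ⟨_, _, hv⟩ := hc lb v hget
        exact ⟨hv, hc⟩
      | none =>
        obtain ⟨hr1, hr2⟩ := pvLoop_ok xs k fuel ih ((lb + k - lb).toNat) lb lb 0 0 c
          h0 (le_refl lb) (by omega) rfl (by push_cast at hf ⊢; omega) hc
        have hlb1 : lb - lb + 1 = (1 : Int) := by ring
        rw [hlb1] at hr1
        set r := pvLoopA xs k fuel (PySem.List.pyRange lb (lb + k) 1) lb 0 0 c with hrdef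
        have hm1 : 1 ≤ ((xs.length : Int) - lb).toNat := by omega
        have hrow := pvRowB_eq_inner xs k (((xs.length : Int) - lb).toNat) hm1
        have hlb : (xs.length : Int) - ((((xs.length : Int) - lb).toNat : Nat) : Int) = lb := by omega
        have hmin : (min k ((((xs.length : Int) - lb).toNat : Nat) : Int)).toNat
            = (min (lb + k) (xs.length : Int) - lb).toNat := by omega
        rw [hlb, hmin] at hrow
        have hSrec : pvS xs k (((xs.length : Int) - lb).toNat)
            = pvRowB xs k (xs.length : Int) ((((xs.length : Int) - lb).toNat : Nat) : Int)
                (pvTbl xs k (((xs.length : Int) - lb).toNat - 1)) := by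
          obtain ⟨m', hm'⟩ : ∃ m', ((xs.length : Int) - lb).toNat = m' + 1 :=
            ⟨((xs.length : Int) - lb).toNat - 1, by omega⟩
          rw [hm']
          simp [pvS, pvTbl]
        have hval : r.1 = pvS xs k (((xs.length : Int) - lb).toNat) := by
          rw [hr1, hSrec, hrow]
        refine ⟨hval, ?_⟩
        intro key v hkv
        rw [PySem.Dict.get?_insert] at hkv
        by_cases hk : key = lb
        · rw [if_pos hk] at hkv
          refine ⟨by omega, by omega, ?_⟩
          rw [hk, ← Option.some_inj.mp hkv, hval]
        · rw [if_neg hk] at hkv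
          exact hr2 key v hkv

lemma pvTbl_fold (xs : List Int) (k : Int) :
    ∀ (M : Nat), (PySem.List.pyRange 1 ((M : Int) + 1) 1).foldl
        (fun dp m => pvRowB xs k (xs.length : Int) m dp :: dp) [0] = pvTbl xs k M := by
  intro M
  induction M with
  | zero => rw [PySem.List.pyRange_one_eq_nil (by norm_num)]; rfl
  | succ M ih =>
    have hsplit : PySem.List.pyRange 1 (((M + 1 : Nat) : Int) + 1) 1
        = PySem.List.pyRange 1 ((M : Int) + 1) 1 ++ [(M : Int) + 1] := by
      have h := PySem.List.pyRange_one_succ_right (a := 1) (b := (M : Int) + 1) (by omega)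
      have hcast : ((M + 1 : Nat) : Int) + 1 = (M : Int) + 1 + 1 := by push_cast; ring
      rw [hcast, h]
    rw [hsplit, List.foldl_append, ih, List.foldl_cons, List.foldl_nil, pvTbl]

-- ===== VERDICT (by name: the statement is the Claim_ definition above) =====
theorem calc_max_sum_partitioned_spec : Claim_equal_calc_max_sum_partitioned := by
  intro xs k hdom hpre
  unfold Spec_calc_max_sum_partitioned calc_max_sum_partitioned calc_max_sum_partitioned_alt
  by_cases h1 : k = 1
  · simp [h1]
  · rw [if_neg h1, if_neg h1]
    by_cases h2 : (xs.length : Int) ≤ k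
    · rw [if_pos h2, if_pos h2]
    · rw [if_neg h2, if_neg h2]
      have hInv : pvInv xs k PySem.Dict.empty := by
        intro key v h
        simp [PySem.Dict.get?_empty] at h
      obtain ⟨hA, _⟩ := pvDfs_ok xs k (xs.length + 1) 0 PySem.Dict.empty (le_refl 0)
        (Int.natCast_nonneg _) (by push_cast; omega) hInv
      rw [hA]
      have hfold := pvTbl_fold xs k xs.length
      have hget := pvTbl_get xs k xs.length 0 (Nat.zero_le _)
      have hz : (((xs.length : Int)) - 0).toNat = xs.length := by omega
      rw [hz]
      show _ = (PySem.List.pyGet? (List.foldl _ [0] (PySem.List.pyRange 1 ((xs.length : Int) + 1) 1)) 0).getD 0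
      rw [hfold]
      rw [show ((0 : Nat) : Int) = (0 : Int) from rfl] at hget
      rw [hget]
      rfl
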